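-- pv_equiv track=rewrite | github.com/465191049/test_git | python/main.py | getTableCount
-- ===== SOURCE A (Python) =====
-- def getTableCount(sql_list):
--     tableCountMap = {}
--     for sql in sql_list:
--         sub = sql[sql.find('from ') : ]
--
--         index = sub.find(' t_')
--         while index != -1:
--
--             if sub[index+1:].find(' ') == -1:
--                 table = sub[index+1:].rstrip('\n')
--                 sub = table
--             else:
--                 table = sub[index+1:sub[index+1:].find(' ')+index+1].rstrip('\n')
--                 sub = sub[sub[index+1:].find(' ')+index+1:]
--
--             if tableCountMap.get(table):
--                 tableCountMap[table] = tableCountMap.get(table) + 1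
--             else:
--                 tableCountMap[table] = 1
--
--             index = sub.find(' t_')
--
--     return tableCountMap
-- ===== SOURCE B (Python) =====
-- def getTableCount(sql_list):
--     counts = {}
--     for sql in sql_list:
--         sub = sql[sql.find('from '):]
--         for token in sub.split(' ')[1:]:
--             if token.startswith('t_'):
--                 name = token.rstrip('\n')
--                 counts[name] = counts.get(name, 0) + 1
--     return counts
-- ===== Notes on version B (the rewrite author's own statement) =====
-- stated objective: simpler
-- what changed: A's cursor loop that repeatedly re-finds ' t_' and a following space and re-slices the working string is replaced by tokenizing each sql once with split(' ') and counting, in one pass, the tokens after the first that start with 't_'.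
import Mathlib
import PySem

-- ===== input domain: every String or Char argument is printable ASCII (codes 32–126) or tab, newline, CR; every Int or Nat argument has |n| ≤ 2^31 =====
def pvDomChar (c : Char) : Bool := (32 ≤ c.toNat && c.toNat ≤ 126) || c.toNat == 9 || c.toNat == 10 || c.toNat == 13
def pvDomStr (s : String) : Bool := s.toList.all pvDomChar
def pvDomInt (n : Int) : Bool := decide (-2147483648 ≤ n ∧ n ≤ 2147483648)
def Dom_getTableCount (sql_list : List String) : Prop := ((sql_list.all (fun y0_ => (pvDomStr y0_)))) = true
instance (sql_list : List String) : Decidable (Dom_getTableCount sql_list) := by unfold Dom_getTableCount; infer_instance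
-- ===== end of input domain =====

-- B replaces A's cursor-based find/slice re-scanning loop with a single split(' ') tokenization
-- and one pass over the tokens (objective: simpler).

-- ===== PORT A =====
-- hand port of Python's s.rstrip('\n') (PySem has no chars-argument rstrip): exact — removes exactly the trailing '\n' characters
def pvRstripNl (cs : List Char) : List Char := (cs.reverse.dropWhile (fun c => c == '\n')).reverse

-- the dict-update block of A: `if tableCountMap.get(table): … get(table)+1 else: … 1` (None / 0 are falsy)
def pvBump (d : PySem.Dict String Int) (t : String) : PySem.Dict String Int :=
  match d.get? t with
  | some v => if v ≠ 0 then d.insert t (v + 1) else d.insert t 1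
  | none   => d.insert t 1

-- A's while loop over (sub, dict); the fuel argument only makes the recursion structural:
-- each iteration shortens sub, so fuel = sub.length + 1 (as called below) is never exhausted
def pvLoopA (fuel : Nat) (sub : List Char) (d : PySem.Dict String Int) : PySem.Dict String Int :=
  match fuel with
  | 0 => d
  | fuel + 1 =>
    let index := PySem.Chars.find sub [' ', 't', '_']
    if index = -1 then d
    else
      let tl := PySem.List.slice sub (some (index + 1)) none
      let j := PySem.Chars.find tl [' ']
      if j = -1 then
        let table := pvRstripNl tl
        pvLoopA fuel table (pvBump d (String.ofList table))
      else
        let table := pvRstripNl (PySem.List.slice sub (some (index + 1)) (some (j + index + 1)))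
        let sub' := PySem.List.slice sub (some (j + index + 1)) none
        pvLoopA fuel sub' (pvBump d (String.ofList table))

def getTableCount (sql_list : List String) : List (String × Int) :=
  (sql_list.foldl (fun d sql =>
      let sub := PySem.List.slice sql.toList
        (some (PySem.Chars.find sql.toList ['f', 'r', 'o', 'm', ' '])) none
      pvLoopA (sub.length + 1) sub d)
    PySem.Dict.empty).items

-- ===== PORT B =====
-- per-token step of B's single pass
def pvCountTok (d : PySem.Dict String Int) (tok : List Char) : PySem.Dict String Int :=
  if PySem.Chars.startswith tok ['t', '_'] then
    let name := String.ofList (pvRstripNl tok)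
    d.insert name (d.getD name 0 + 1)
  else d

def getTableCount_alt (sql_list : List String) : List (String × Int) :=
  (sql_list.foldl (fun d sql =>
      let sub := PySem.List.slice sql.toList
        (some (PySem.Chars.find sql.toList ['f', 'r', 'o', 'm', ' '])) none
      (PySem.List.slice (PySem.Chars.splitOn sub [' ']) (some 1) none).foldl pvCountTok d)
    PySem.Dict.empty).items

-- ===== PRECONDITION & SPEC =====
def Spec_getTableCount (sql_list : List String) (out : List (String × Int)) : Prop := out = getTableCount_alt sql_list
instance (sql_list : List String) (out : List (String × Int)) : Decidable (Spec_getTableCount sql_list out) := by unfold Spec_getTableCount; infer_instance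

-- ===== CLAIM (what is proved, stated in full; the proofs are below) =====
def Claim_equal_getTableCount : Prop := ∀ (sql_list : List String), Dom_getTableCount sql_list → Spec_getTableCount sql_list (getTableCount sql_list)

-- ===== LEMMAS AND PROOFS =====

-- proof-side structural version of split(' ')
def pvTokens : List Char → List (List Char)
  | [] => [[]]
  | c :: cs => if c = ' ' then [] :: pvTokens cs else (c :: (pvTokens cs).headI) :: (pvTokens cs).tail

lemma pvTokens_ne_nil (cs : List Char) : pvTokens cs ≠ [] := by
  cases cs with
  | nil => simp [pvTokens]
  | cons c cs => by_cases h : c = ' ' <;> simp [pvTokens, h]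

lemma pvTokens_headI_prefix (cs : List Char) : (pvTokens cs).headI <+: cs := by
  induction cs with
  | nil => simp [pvTokens]
  | cons c cs ih =>
    by_cases h : c = ' '
    · simp [pvTokens, h]
    · simpa [pvTokens, h, List.cons_prefix_cons] using ih

lemma pvTokens_append_space (xs ys : List Char) :
    pvTokens (xs ++ ' ' :: ys) = pvTokens xs ++ pvTokens ys := by
  induction xs with
  | nil => simp [pvTokens]
  | cons c xs ih =>
    by_cases h : c = ' '
    · simp [pvTokens, h, ih]
    · obtain ⟨t0, ts0, hts⟩ : ∃ t0 ts0, pvTokens xs = t0 :: ts0 := by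
        cases hx : pvTokens xs with
        | nil => exact absurd hx (pvTokens_ne_nil xs)
        | cons a b => exact ⟨a, b, rfl⟩
      simp [pvTokens, h, ih, hts]

lemma pvTokens_no_space {cs : List Char} (h : ' ' ∉ cs) : pvTokens cs = [cs] := by
  induction cs with
  | nil => simp [pvTokens]
  | cons c cs ih =>
    have hc : c ≠ ' ' := by rintro rfl; exact h (List.mem_cons_self ..)
    have := ih (fun hm => h (List.mem_cons_of_mem _ hm))
    simp [pvTokens, hc, this]

lemma pvGo_spec (fuel : Nat) (l cur : List Char) (acc : List (List Char)) (hf : l.length ≤ fuel) :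
    PySem.Chars.splitOn.go [' '] fuel l cur acc
      = acc.reverse ++ ((cur.reverse ++ (pvTokens l).headI) :: (pvTokens l).tail) := by
  induction fuel generalizing l cur acc with
  | zero =>
    have : l = [] := List.length_eq_zero_iff.mp (Nat.le_zero.mp hf)
    subst this
    rw [PySem.Chars.splitOn.go]
    simp [pvTokens]
  | succ fuel ih =>
    cases l with
    | nil =>
      rw [PySem.Chars.splitOn.go]
      simp [pvTokens]
      omega
    | cons c rest =>
      rw [PySem.Chars.splitOn.go]
      have hrest : rest.length ≤ fuel := by simpa using hf
      by_cases hc : c = ' '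
      · subst hc
        have hpre : [' '].isPrefixOf (' ' :: rest) = true := by simp [List.isPrefixOf]
        simp only [hpre, if_true, List.length_singleton, List.drop_one, List.tail_cons]
        rw [ih rest [] (cur.reverse :: acc) hrest]
        obtain ⟨t0, ts0, hts⟩ : ∃ t0 ts0, pvTokens rest = t0 :: ts0 := by
          cases hx : pvTokens rest with
          | nil => exact absurd hx (pvTokens_ne_nil rest)
          | cons a b => exact ⟨a, b, rfl⟩
        simp [pvTokens, hts]
      · have hpre : [' '].isPrefixOf (c :: rest) = false := by
          simp [List.isPrefixOf]; intro h; exact absurd h.symm hc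
        simp only [hpre, Bool.false_eq_true, if_false]
        rw [ih rest (c :: cur) acc hrest]
        obtain ⟨t0, ts0, hts⟩ : ∃ t0 ts0, pvTokens rest = t0 :: ts0 := by
          cases hx : pvTokens rest with
          | nil => exact absurd hx (pvTokens_ne_nil rest)
          | cons a b => exact ⟨a, b, rfl⟩
        simp [pvTokens, hc, hts]

lemma pvSplitOn_eq_tokens (cs : List Char) : PySem.Chars.splitOn cs [' '] = pvTokens cs := by
  rw [PySem.Chars.splitOn, pvGo_spec (cs.length + 1) cs [] [] (by omega)]
  obtain ⟨t0, ts0, hts⟩ : ∃ t0 ts0, pvTokens cs = t0 :: ts0 := by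
    cases hx : pvTokens cs with
    | nil => exact absurd hx (pvTokens_ne_nil cs)
    | cons a b => exact ⟨a, b, rfl⟩
  simp [hts]

-- a t_-token in the tail of the tokens means ' t_' occurs in the string
lemma pvTail_t_infix {cs tok : List Char} (htok : tok ∈ (pvTokens cs).tail)
    (hpre : ['t', '_'] <+: tok) : [' ', 't', '_'] <:+: cs := by
  induction cs with
  | nil => simp [pvTokens] at htok
  | cons c cs ih =>
    by_cases h : c = ' '
    · subst h
      simp only [pvTokens, if_true] at htok
      obtain ⟨t0, ts0, hts⟩ : ∃ t0 ts0, pvTokens cs = t0 :: ts0 := by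
        cases hx : pvTokens cs with
        | nil => exact absurd hx (pvTokens_ne_nil cs)
        | cons a b => exact ⟨a, b, rfl⟩
      rw [hts] at htok
      rcases List.mem_cons.mp htok with rfl | hmem
      · have h1 : ['t', '_'] <+: cs := by
          have h2 : tok <+: cs := by
            have := pvTokens_headI_prefix cs; rwa [hts] at this
          exact hpre.trans h2
        obtain ⟨u, hu⟩ := h1
        exact ⟨[], u, by simp [← hu]⟩
      · have : tok ∈ (pvTokens cs).tail := by rw [hts]; exact hmem
        exact List.infix_cons (ih this)
    · have : tok ∈ (pvTokens cs).tail := by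
        simpa [pvTokens, h] using htok
      exact List.infix_cons (ih this)

lemma pvFold_skip {ts : List (List Char)} (h : ∀ tok ∈ ts, ¬ ['t', '_'] <+: tok)
    (d : PySem.Dict String Int) : ts.foldl pvCountTok d = d := by
  induction ts generalizing d with
  | nil => rfl
  | cons t ts ih =>
    have hns : PySem.Chars.startswith t ['t', '_'] = false := by
      rw [← Bool.not_eq_true, PySem.Chars.startswith_iff]
      exact h t (List.mem_cons_self ..)
    simp only [List.foldl_cons, pvCountTok, hns, Bool.false_eq_true, if_false]
    exact ih (fun tok hm => h tok (List.mem_cons_of_mem _ hm)) d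

def pvInv (d : PySem.Dict String Int) : Prop := ∀ kv ∈ d.items, 1 ≤ kv.2

lemma pvMem_insert {d : PySem.Dict String Int} {k : String} {v : Int} {kv : String × Int}
    (h : kv ∈ (d.insert k v).items) : kv = (k, v) ∨ kv ∈ d.items := by
  simp only [PySem.Dict.insert] at h
  by_cases hc : d.contains k
  · simp only [hc, if_true] at h
    obtain ⟨p, hp, hpe⟩ := List.mem_map.mp h
    by_cases he : p.1 == k
    · left; simp only [he, if_true] at hpe; exact hpe.symm
    · right; simp only [he, Bool.false_eq_true, if_false] at hpe; exact hpe ▸ hp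
  · simp only [hc, Bool.false_eq_true, if_false, List.mem_append, List.mem_singleton] at h
    tauto

lemma pvGet?_one_le {d : PySem.Dict String Int} (hd : pvInv d) {t : String} {v : Int}
    (hq : d.get? t = some v) : 1 ≤ v := by
  simp only [PySem.Dict.get?, Option.map_eq_some_iff] at hq
  obtain ⟨p, hp, hpe⟩ := hq
  exact hpe ▸ hd p (List.mem_of_find?_eq_some hp)

lemma pvBump_eq {d : PySem.Dict String Int} (hd : pvInv d) (t : String) :
    pvBump d t = d.insert t (d.getD t 0 + 1) := by
  unfold pvBump
  cases hq : d.get? t with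
  | none => simp [PySem.Dict.getD, hq]
  | some v =>
    have hv : 1 ≤ v := pvGet?_one_le hd hq
    simp [PySem.Dict.getD, hq, show v ≠ 0 by omega]

lemma pvInv_bump {d : PySem.Dict String Int} (hd : pvInv d) (t : String) :
    pvInv (pvBump d t) := by
  rw [pvBump_eq hd]
  intro kv hkv
  rcases pvMem_insert hkv with rfl | h
  · have : 0 ≤ d.getD t 0 := by
      cases hq : d.get? t with
      | none => simp [PySem.Dict.getD, hq]
      | some v => have := pvGet?_one_le hd hq; simp [PySem.Dict.getD, hq]; omega
    simpa using by omega
  · exact hd _ h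

-- equation lemmas for pvLoopA's three branches
lemma pvLoopA_eq_neg {fuel : Nat} {sub : List Char} {d : PySem.Dict String Int}
    (h : PySem.Chars.find sub [' ', 't', '_'] = -1) : pvLoopA (fuel + 1) sub d = d := by
  rw [pvLoopA]; simp [h]

lemma pvLoopA_eq_pos1 {fuel : Nat} {sub : List Char} {d : PySem.Dict String Int}
    (h : ¬ PySem.Chars.find sub [' ', 't', '_'] = -1)
    (hj : PySem.Chars.find (PySem.List.slice sub (some (PySem.Chars.find sub [' ', 't', '_'] + 1)) none) [' '] = -1) :
    pvLoopA (fuel + 1) sub d = pvLoopA fuel (pvRstripNl (PySem.List.slice sub (some (PySem.Chars.find sub [' ', 't', '_'] + 1)) none))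
      (pvBump d (String.ofList (pvRstripNl (PySem.List.slice sub (some (PySem.Chars.find sub [' ', 't', '_'] + 1)) none)))) := by
  rw [pvLoopA]; simp [h, hj]

lemma pvLoopA_eq_pos2 {fuel : Nat} {sub : List Char} {d : PySem.Dict String Int}
    (h : ¬ PySem.Chars.find sub [' ', 't', '_'] = -1)
    (hj : ¬ PySem.Chars.find (PySem.List.slice sub (some (PySem.Chars.find sub [' ', 't', '_'] + 1)) none) [' '] = -1) :
    pvLoopA (fuel + 1) sub d = pvLoopA fuel
      (PySem.List.slice sub (some (PySem.Chars.find (PySem.List.slice sub (some (PySem.Chars.find sub [' ', 't', '_'] + 1)) none) [' '] + PySem.Chars.find sub [' ', 't', '_'] + 1)) none)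
      (pvBump d (String.ofList (pvRstripNl (PySem.List.slice sub (some (PySem.Chars.find sub [' ', 't', '_'] + 1))
        (some (PySem.Chars.find (PySem.List.slice sub (some (PySem.Chars.find sub [' ', 't', '_'] + 1)) none) [' '] + PySem.Chars.find sub [' ', 't', '_'] + 1)))))) := by
  rw [pvLoopA]; simp [h, hj]

lemma pvRstripNl_sublist (cs : List Char) : (pvRstripNl cs).Sublist cs := by
  have h := List.dropWhile_sublist (l := cs.reverse) (p := fun c => c == '\n')
  simpa [pvRstripNl] using List.Sublist.reverse h

lemma pvMem_of_infix_singleton {c : Char} {l : List Char} (h : c ∈ l) : [c] <:+: l := by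
  obtain ⟨s, t, rfl⟩ := List.append_of_mem h
  exact ⟨s, t, by simp⟩

lemma pvNot_mem_take {l : List Char} {n : Nat} {c : Char}
    (h : ∀ k, k < n → ¬ [c] <+: l.drop k) : c ∉ l.take n := by
  intro hm
  obtain ⟨k, hk, hget⟩ := List.mem_iff_getElem.mp hm
  have hk' : k < l.length := lt_of_lt_of_le hk (by simp)
  have hkn : k < n := lt_of_lt_of_le hk (by simp)
  refine h k hkn ⟨l.drop (k + 1), ?_⟩
  have hc : l[k] = c := (List.getElem_take).symm.trans hget
  have hcd : l[k] :: l.drop (k + 1) = l.drop k := List.getElem_cons_drop hk'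
  rw [← hcd, hc, List.singleton_append]

lemma pvMain (n : Nat) : ∀ (sub : List Char) (d : PySem.Dict String Int), sub.length < n → pvInv d →
    pvLoopA n sub d = ((pvTokens sub).tail).foldl pvCountTok d ∧ pvInv (pvLoopA n sub d) := by
  induction n with
  | zero =>
    intro sub d hlen hinv
    exact absurd hlen (by omega)
  | succ n ih =>
    intro sub d hlen hinv
    by_cases h : PySem.Chars.find sub [' ', 't', '_'] = -1
    · have hA : pvLoopA (n + 1) sub d = d := pvLoopA_eq_neg h
      rw [hA]
      refine ⟨?_, hinv⟩
      symm
      apply pvFold_skip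
      intro tok hmem hpre
      exact (PySem.Chars.find_eq_neg_one_iff ..).mp h (pvTail_t_infix hmem hpre)
    · -- the ' t_' occurrence decomposes sub = take i ++ ' ' :: 't' :: '_' :: r
      have h0 : (0:Int) ≤ PySem.Chars.find sub [' ', 't', '_'] := by
        have := PySem.Chars.neg_one_le_find sub [' ', 't', '_']; omega
      have hsp := PySem.Chars.find_spec (s := sub) (sub := [' ', 't', '_']) h0
      set i : Nat := (PySem.Chars.find sub [' ', 't', '_']).toNat with hidef
      have hi : PySem.Chars.find sub [' ', 't', '_'] = (i : Int) := (Int.toNat_of_nonneg h0).symm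
      obtain ⟨r, hr⟩ := hsp.1
      have hlen3 : i + 3 ≤ sub.length := by
        have h1 : ([' ', 't', '_'] ++ r).length = (sub.drop i).length := by rw [hr]
        simp [List.length_drop] at h1
        omega
      have hp : sub = sub.take i ++ (' ' :: 't' :: '_' :: r) := by
        conv_lhs => rw [← List.take_append_drop i sub]
        rw [← hr]
        simp
      have hdropi : sub.drop i = ' ' :: 't' :: '_' :: r := by
        rw [← hr]; simp
      have htl : sub.drop (i + 1) = 't' :: '_' :: r := by
        rw [← List.tail_drop, hdropi]
        rfl
      have hcast1 : PySem.Chars.find sub [' ', 't', '_'] + 1 = ((i + 1 : Nat) : Int) := by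
        rw [hi]; push_cast; ring
      have hslice_tl : PySem.List.slice sub (some (PySem.Chars.find sub [' ', 't', '_'] + 1)) none = 't' :: '_' :: r := by
        rw [hcast1]
        simp only [PySem.List.slice_from_natCast sub (i + 1)]
        exact htl
      have htok : pvTokens sub = pvTokens (sub.take i) ++ pvTokens ('t' :: '_' :: r) := by
        conv_lhs => rw [hp]
        exact pvTokens_append_space _ _
      have hptail : (pvTokens sub).tail = (pvTokens (sub.take i)).tail ++ pvTokens ('t' :: '_' :: r) := by
        rw [htok]
        cases hx : pvTokens (sub.take i) with
        | nil => exact absurd hx (pvTokens_ne_nil _)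
        | cons a b => simp
      have hskip : ∀ tok ∈ (pvTokens (sub.take i)).tail, ¬ ['t', '_'] <+: tok := by
        intro tok hm hpre
        obtain ⟨s1, s2, hs⟩ := pvTail_t_infix hm hpre
        set k := s1.length with hkdef
        have hk3 : k + 3 ≤ (sub.take i).length := by
          rw [← hs]; simp; omega
        have hki : k < i := by
          have : (sub.take i).length ≤ i := by simp
          omega
        have hpref : [' ', 't', '_'] <+: (sub.take i).drop k := by
          refine ⟨s2, ?_⟩
          rw [← hs, List.append_assoc, List.drop_left]
        have h1 : (sub.take i).drop k = (sub.drop k).take (i - k) := List.drop_take ..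
        have h2 : ((sub.drop k).take (i - k)) <+: sub.drop k := List.take_prefix ..
        exact hsp.2 k hki ((h1 ▸ hpref).trans h2)
      have hB : ((pvTokens sub).tail).foldl pvCountTok d = (pvTokens ('t' :: '_' :: r)).foldl pvCountTok d := by
        rw [hptail, List.foldl_append, pvFold_skip hskip]
      by_cases hj : PySem.Chars.find (PySem.List.slice sub (some (PySem.Chars.find sub [' ', 't', '_'] + 1)) none) [' '] = -1
      · -- last token: no further space
        have hj' : PySem.Chars.find ('t' :: '_' :: r) [' '] = -1 := by rwa [hslice_tl] at hj
        have hnosp : ' ' ∉ ('t' :: '_' :: r) := by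
          intro hm
          exact (PySem.Chars.find_eq_neg_one_iff ..).mp hj' (pvMem_of_infix_singleton hm)
        have hA : pvLoopA (n + 1) sub d = pvLoopA n (pvRstripNl ('t' :: '_' :: r))
            (pvBump d (String.ofList (pvRstripNl ('t' :: '_' :: r)))) := by
          rw [pvLoopA_eq_pos1 h hj, hslice_tl]
        set table := pvRstripNl ('t' :: '_' :: r) with htabdef
        set d' := pvBump d (String.ofList table) with hd'def
        have hinv' : pvInv d' := pvInv_bump hinv _
        have hlt : table.length < n := by
          have h1 : table.Sublist ('t' :: '_' :: r) := pvRstripNl_sublist _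
          have h2 := h1.length_le
          have h3 : ('t' :: '_' :: r).length = sub.length - (i + 1) := by
            rw [← htl]; simp
          simp at h2 h3 ⊢
          omega
        obtain ⟨hEq, hInvA⟩ := ih table d' hlt hinv'
        have hnosp2 : ' ' ∉ table := fun hm => hnosp ((pvRstripNl_sublist _).mem hm)
        have hAd : pvLoopA n table d' = d' := by
          rw [hEq, pvTokens_no_space hnosp2]
          simp
        have hstart : PySem.Chars.startswith ('t' :: '_' :: r) ['t', '_'] = true := by
          simp [PySem.Chars.startswith, List.isPrefixOf]
        have hBfin : (pvTokens ('t' :: '_' :: r)).foldl pvCountTok d = d' := by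
          rw [pvTokens_no_space hnosp]
          simp only [List.foldl_cons, List.foldl_nil, pvCountTok, hstart, if_true]
          rw [hd'def, htabdef, pvBump_eq hinv]
        refine ⟨?_, ?_⟩
        · rw [hA, hAd, hB, hBfin]
        · rw [hA, hAd]; exact hinv'
      · -- token ends at the next space
        have hj0 : (0:Int) ≤ PySem.Chars.find (PySem.List.slice sub (some (PySem.Chars.find sub [' ', 't', '_'] + 1)) none) [' '] := by
          have := PySem.Chars.neg_one_le_find (PySem.List.slice sub (some (PySem.Chars.find sub [' ', 't', '_'] + 1)) none) [' ']
          omega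
        have hfind_eq : PySem.Chars.find (PySem.List.slice sub (some (PySem.Chars.find sub [' ', 't', '_'] + 1)) none) [' '] = PySem.Chars.find ('t' :: '_' :: r) [' '] := by
          rw [hslice_tl]
        rw [hfind_eq] at hj0
        have hspj := PySem.Chars.find_spec (s := 't' :: '_' :: r) (sub := [' ']) hj0
        set jn : Nat := (PySem.Chars.find ('t' :: '_' :: r) [' ']).toNat with hjdef
        have hjeq : PySem.Chars.find ('t' :: '_' :: r) [' '] = (jn : Int) := (Int.toNat_of_nonneg hj0).symm
        obtain ⟨r2, hr2⟩ := hspj.1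
        have hjn2 : 2 ≤ jn := by
          by_contra hlt2
          have h01 : jn = 0 ∨ jn = 1 := by omega
          rcases h01 with h' | h' <;> rw [h'] at hr2 <;> simp at hr2
        have hw : ('t' :: '_' :: r).take jn = 't' :: '_' :: r.take (jn - 2) := by
          obtain ⟨m, hm⟩ : ∃ m, jn = m + 2 := ⟨jn - 2, by omega⟩
          rw [hm]
          simp
        have hnospw : ' ' ∉ ('t' :: '_' :: r).take jn := by
          apply pvNot_mem_take
          intro k hk
          exact hspj.2 k hk
        have hcast2 : PySem.Chars.find (PySem.List.slice sub (some (PySem.Chars.find sub [' ', 't', '_'] + 1)) none) [' '] + PySem.Chars.find sub [' ', 't', '_'] + 1 = ((jn + i + 1 : Nat) : Int) := by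
          rw [hfind_eq, hjeq, hi]; push_cast; ring
        have hdropjn : sub.drop (jn + i + 1) = ('t' :: '_' :: r).drop jn := by
          rw [← htl, List.drop_drop]
          congr 1
          omega
        have hslice_w : PySem.List.slice sub (some (PySem.Chars.find sub [' ', 't', '_'] + 1))
            (some (PySem.Chars.find (PySem.List.slice sub (some (PySem.Chars.find sub [' ', 't', '_'] + 1)) none) [' '] + PySem.Chars.find sub [' ', 't', '_'] + 1)) = ('t' :: '_' :: r).take jn := by
          rw [hcast2, hcast1]
          simp only [PySem.List.slice_natCast]
          rw [htl, show jn + i + 1 - (i + 1) = jn by omega]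
        have hslice_rest : PySem.List.slice sub
            (some (PySem.Chars.find (PySem.List.slice sub (some (PySem.Chars.find sub [' ', 't', '_'] + 1)) none) [' '] + PySem.Chars.find sub [' ', 't', '_'] + 1)) none = ' ' :: r2 := by
          rw [hcast2]
          simp only [PySem.List.slice_from_natCast]
          rw [hdropjn, ← hr2]
          simp
        have hA : pvLoopA (n + 1) sub d = pvLoopA n (' ' :: r2)
            (pvBump d (String.ofList (pvRstripNl (('t' :: '_' :: r).take jn)))) := by
          rw [pvLoopA_eq_pos2 h hj, hslice_w, hslice_rest]
        set d' := pvBump d (String.ofList (pvRstripNl (('t' :: '_' :: r).take jn))) with hd'def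
        have hinv' : pvInv d' := pvInv_bump hinv _
        have hlenrest : (' ' :: r2).length < n := by
          have h1 : ((' ' :: r2) : List Char).length = sub.length - (jn + i + 1) := by
            rw [show ((' ' :: r2) : List Char) = sub.drop (jn + i + 1) by rw [hdropjn, ← hr2]; simp]
            simp
          omega
        obtain ⟨hEq, hInvA⟩ := ih (' ' :: r2) d' hlenrest hinv'
        have hAd : pvLoopA n (' ' :: r2) d' = (pvTokens r2).foldl pvCountTok d' := by
          rw [hEq]
          simp [pvTokens]
        have hdecomp : ('t' :: '_' :: r) = ('t' :: '_' :: r).take jn ++ ' ' :: r2 := by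
          conv_lhs => rw [← List.take_append_drop jn ('t' :: '_' :: r)]
          rw [← hr2]
          simp
        have hstart : PySem.Chars.startswith (('t' :: '_' :: r).take jn) ['t', '_'] = true := by
          rw [hw]
          simp [PySem.Chars.startswith, List.isPrefixOf]
        have hBfin : (pvTokens ('t' :: '_' :: r)).foldl pvCountTok d = (pvTokens r2).foldl pvCountTok d' := by
          conv_lhs => rw [hdecomp]
          rw [pvTokens_append_space (('t' :: '_' :: r).take jn) r2, pvTokens_no_space hnospw]
          simp only [List.singleton_append, List.foldl_cons, pvCountTok, hstart, if_true]
          rw [hd'def, pvBump_eq hinv]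
        refine ⟨?_, ?_⟩
        · rw [hA, hAd, hB, hBfin]
        · rw [hA]; exact hInvA

lemma pvInv_empty : pvInv (PySem.Dict.empty : PySem.Dict String Int) := by
  intro kv hkv
  simp [PySem.Dict.empty] at hkv

lemma pvFold_list (l : List String) : ∀ d : PySem.Dict String Int, pvInv d →
    l.foldl (fun d sql =>
        let sub := PySem.List.slice sql.toList
          (some (PySem.Chars.find sql.toList ['f', 'r', 'o', 'm', ' '])) none
        pvLoopA (sub.length + 1) sub d) d
      = l.foldl (fun d sql =>
        let sub := PySem.List.slice sql.toList
          (some (PySem.Chars.find sql.toList ['f', 'r', 'o', 'm', ' '])) none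
        (PySem.List.slice (PySem.Chars.splitOn sub [' ']) (some 1) none).foldl pvCountTok d) d := by
  induction l with
  | nil => intro d _; rfl
  | cons sql l ih =>
    intro d hinv
    simp only [List.foldl_cons]
    obtain ⟨hEq, hInvA⟩ := pvMain ((PySem.List.slice sql.toList
      (some (PySem.Chars.find sql.toList ['f', 'r', 'o', 'm', ' '])) none).length + 1)
      (PySem.List.slice sql.toList
        (some (PySem.Chars.find sql.toList ['f', 'r', 'o', 'm', ' '])) none) d (Nat.lt_succ_self _) hinv
    have hstep : (PySem.List.slice (PySem.Chars.splitOn (PySem.List.slice sql.toList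
          (some (PySem.Chars.find sql.toList ['f', 'r', 'o', 'm', ' '])) none) [' ']) (some 1) none).foldl pvCountTok d
        = pvLoopA ((PySem.List.slice sql.toList
          (some (PySem.Chars.find sql.toList ['f', 'r', 'o', 'm', ' '])) none).length + 1)
          (PySem.List.slice sql.toList
            (some (PySem.Chars.find sql.toList ['f', 'r', 'o', 'm', ' '])) none) d := by
      simp only [PySem.List.slice_from_one, pvSplitOn_eq_tokens]
      exact hEq.symm
    rw [hstep]
    exact ih _ hInvA

-- ===== VERDICT (by name: the statement is the Claim_ definition above) =====
theorem getTableCount_spec : Claim_equal_getTableCount := by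
  unfold Claim_equal_getTableCount
  intro sql_list _
  unfold Spec_getTableCount getTableCount getTableCount_alt
  rw [pvFold_list sql_list PySem.Dict.empty pvInv_empty]
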